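-- pv_equiv track=rewrite | github.com/z2labplus/mjlab | backend/mahjong_analyzer_final.py | _check_thirteen_orphans
-- ===== SOURCE A (Python) =====
-- def _check_thirteen_orphans(counts):
--     """检查国士无双"""
--     yaochuhai = [0, 8, 9, 17, 18, 26, 27, 28, 29, 30, 31, 32, 33]
--
--     has_pair = False
--     for idx in yaochuhai:
--         if counts[idx] == 0:
--             return False
--         elif counts[idx] == 2:
--             if has_pair:
--                 return False
--             has_pair = True
--         elif counts[idx] != 1:
--             return False
--
--     # 检查其他牌是否为0
--     for i in range(34):
--         if i not in yaochuhai and counts[i] != 0: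
--             return False
--
--     return has_pair
-- ===== SOURCE B (Python) =====
-- def _check_thirteen_orphans(counts):
--     yaochuhai = [0, 8, 9, 17, 18, 26, 27, 28, 29, 30, 31, 32, 33]
--     if len(counts) < 34:
--         return False
--     total = sum(counts[i] for i in range(34))
--     if total != 14:
--         return False
--     return all(counts[i] >= 1 if i in yaochuhai else counts[i] == 0
--                for i in range(34))
-- ===== Notes on version B (the rewrite author's own statement) =====
-- stated objective: simpler
-- what changed: Replaces A's has_pair state machine (per-tile case analysis 0/2/!=1 with a pair flag) by the arithmetic invariant: at least 34 counts, total over indices 0..33 equals 14, every terminal/honor count >= 1, every other count == 0 - 14 tiles with all 13 yaochuhai present forces exactly one pair.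
import Mathlib
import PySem

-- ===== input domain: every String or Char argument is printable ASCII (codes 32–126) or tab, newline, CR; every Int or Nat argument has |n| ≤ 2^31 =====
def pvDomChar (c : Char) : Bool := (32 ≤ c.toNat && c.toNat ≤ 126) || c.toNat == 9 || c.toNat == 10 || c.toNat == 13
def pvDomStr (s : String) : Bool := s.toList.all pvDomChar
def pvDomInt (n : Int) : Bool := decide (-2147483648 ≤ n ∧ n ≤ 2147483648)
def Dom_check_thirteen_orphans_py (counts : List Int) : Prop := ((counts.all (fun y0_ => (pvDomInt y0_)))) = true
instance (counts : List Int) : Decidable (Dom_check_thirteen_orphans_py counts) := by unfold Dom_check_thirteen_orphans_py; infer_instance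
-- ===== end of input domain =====

-- B replaces A's has_pair state machine by the arithmetic invariant total=14 ∧ all 13
-- yaochuhai present ∧ others zero (objective: simpler).

-- ===== PORT A =====
def pvYaochu : List Int := [0, 8, 9, 17, 18, 26, 27, 28, 29, 30, 31, 32, 33]

-- second loop of A: for i in range(34): if i not in yaochuhai and counts[i] != 0: return False; return hp
def pvALoop2 (counts : List Int) (hp : Bool) : List Int → Bool
  | [] => hp
  | i :: rest =>
      if ¬ pvYaochu.contains i ∧ PySem.List.pyGetD counts i 0 ≠ 0 then false
      else pvALoop2 counts hp rest

-- first loop of A with the has_pair flag (counts[idx] via pyGetD; in range under Pre_)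
def pvALoop1 (counts : List Int) (hp : Bool) : List Int → Bool
  | [] => pvALoop2 counts hp (PySem.List.pyRange 0 34 1)
  | idx :: rest =>
      if PySem.List.pyGetD counts idx 0 == 0 then false
      else if PySem.List.pyGetD counts idx 0 == 2 then
        (if hp then false else pvALoop1 counts true rest)
      else if PySem.List.pyGetD counts idx 0 != 1 then false
      else pvALoop1 counts hp rest

def check_thirteen_orphans_py (counts : List Int) : Bool :=
  pvALoop1 counts false pvYaochu

-- ===== PORT B =====
def check_thirteen_orphans_py_alt (counts : List Int) : Bool :=
  if counts.length < 34 then false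
  else
  let total := ((PySem.List.pyRange 0 34 1).map (fun i => PySem.List.pyGetD counts i 0)).sum
  if total ≠ 14 then false
  else (PySem.List.pyRange 0 34 1).all (fun i =>
    if pvYaochu.contains i then decide (1 ≤ PySem.List.pyGetD counts i 0)
    else PySem.List.pyGetD counts i 0 == 0)

-- ===== PRECONDITION & SPEC =====
-- Pre_ excludes exactly the inputs on which Python A raises IndexError: lists shorter than
-- 34 whose in-range yaochuhai counts are all 1 or 2 with at most one 2 (so the first loop
-- reaches an out-of-range yaochuhai index instead of returning False in range).
def Pre_check_thirteen_orphans_py (counts : List Int) : Prop :=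
  34 ≤ counts.length ∨
    ¬((∀ i ∈ ([0, 8, 9, 17, 18, 26, 27, 28, 29, 30, 31, 32, 33] : List Int),
          i < (counts.length : Int) →
          (PySem.List.pyGetD counts i 0 = 1 ∨ PySem.List.pyGetD counts i 0 = 2))
      ∧ ([0, 8, 9, 17, 18, 26, 27, 28, 29, 30, 31, 32, 33] : List Int).countP
          (fun i => decide (i < (counts.length : Int)) && (PySem.List.pyGetD counts i 0 == 2)) ≤ 1)
instance (counts : List Int) : Decidable (Pre_check_thirteen_orphans_py counts) := by
  unfold Pre_check_thirteen_orphans_py; infer_instance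

def pvWitness_check_thirteen_orphans_py : List Int :=
  [2,0,0,0,0,0,0,0,1, 1,0,0,0,0,0,0,0,1, 1,0,0,0,0,0,0,0,1, 1,1,1,1,1,1,1]

def Spec_check_thirteen_orphans_py (counts : List Int) (out : Bool) : Prop := out = check_thirteen_orphans_py_alt counts
instance (counts : List Int) (out : Bool) : Decidable (Spec_check_thirteen_orphans_py counts out) := by unfold Spec_check_thirteen_orphans_py; infer_instance

-- ===== CLAIM (what is proved, stated in full; the proofs are below) =====
def Claim_equal_check_thirteen_orphans_py : Prop := ∀ (counts : List Int), Dom_check_thirteen_orphans_py counts → Pre_check_thirteen_orphans_py counts → Spec_check_thirteen_orphans_py counts (check_thirteen_orphans_py counts)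


-- ===== LEMMAS AND PROOFS =====

theorem pvLoop2_eq (counts : List Int) (hp : Bool) (l : List Int) :
    pvALoop2 counts hp l
      = (hp && l.all (fun i => pvYaochu.contains i || (PySem.List.pyGetD counts i 0 == 0))) := by
  induction l with
  | nil => simp [pvALoop2]
  | cons i rest ih =>
      simp only [pvALoop2, List.all_cons]
      by_cases h1 : i ∈ pvYaochu
      · simp [h1, ih]
      · by_cases h2 : PySem.List.pyGetD counts i 0 = 0
        · simp [h1, h2, ih]
        · simp [h1, h2]

-- the second-loop condition, as a Prop
def pvSec (counts : List Int) : Prop :=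
  ((PySem.List.pyRange 0 34 1).all
    (fun i => pvYaochu.contains i || (PySem.List.pyGetD counts i 0 == 0))) = true

theorem pvLoop1_iff (counts : List Int) (hp : Bool) (l : List Int) :
    pvALoop1 counts hp l = true ↔
      (pvSec counts ∧ (∀ i ∈ l, PySem.List.pyGetD counts i 0 = 1 ∨ PySem.List.pyGetD counts i 0 = 2)
        ∧ l.countP (fun i => PySem.List.pyGetD counts i 0 == 2) + (if hp then 1 else 0) = 1) := by
  induction l generalizing hp with
  | nil =>
      cases hp <;> simp [pvALoop1, pvLoop2_eq, pvSec]
  | cons i rest ih =>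
      simp only [pvALoop1, List.countP_cons, List.mem_cons]
      by_cases h0 : PySem.List.pyGetD counts i 0 = 0
      · simp [h0]
      · by_cases h2 : PySem.List.pyGetD counts i 0 = 2
        · cases hp with
          | false =>
              simp only [h2]
              simp [ih, h2]
          | true => simp [h2]
        · by_cases h1 : PySem.List.pyGetD counts i 0 = 1
          · simp [h1, ih]
          · simp [h0, h1, h2]

-- generic arithmetic lemmas on lists of integer counts
theorem pvSum_ge_len (vs : List Int) (h : ∀ v ∈ vs, 1 ≤ v) : (vs.length : Int) ≤ vs.sum := by
  induction vs with
  | nil => simp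
  | cons v rest ih =>
      have h1 := h v (by simp)
      have h2 : (rest.length : Int) ≤ rest.sum := ih (fun w hw => h w (by simp [hw]))
      simp only [List.sum_cons, List.length_cons]
      push_cast; omega

theorem pvAll_one (vs : List Int) (h : ∀ v ∈ vs, 1 ≤ v) (hs : vs.sum = vs.length) :
    ∀ v ∈ vs, v = 1 := by
  induction vs with
  | nil => simp
  | cons v rest ih =>
      have h1 := h v (by simp)
      have h2 : (rest.length : Int) ≤ rest.sum := pvSum_ge_len rest (fun w hw => h w (by simp [hw]))
      simp only [List.sum_cons, List.length_cons] at hs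
      have hv : v = 1 := by omega
      have hrest : rest.sum = rest.length := by push_cast at hs ⊢; omega
      intro w hw
      rcases List.mem_cons.mp hw with rfl | hw'
      · exact hv
      · exact ih (fun w hw => h w (by simp [hw])) hrest w hw'

theorem pvKey (vs : List Int) :
    ((∀ v ∈ vs, v = 1 ∨ v = 2) ∧ vs.countP (fun v => v == 2) = 1)
      ↔ ((∀ v ∈ vs, 1 ≤ v) ∧ vs.sum = (vs.length : Int) + 1) := by
  constructor
  · rintro ⟨hall, hcnt⟩
    constructor
    · intro v hv; rcases hall v hv with h | h <;> omega
    · -- sum = length + countP when each element is 1 or 2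
      have : ∀ ws : List Int, (∀ v ∈ ws, v = 1 ∨ v = 2) →
          ws.sum = (ws.length : Int) + (ws.countP (fun v => v == 2) : Int) := by
        intro ws hws
        induction ws with
        | nil => simp
        | cons v rest ih =>
            have hv := hws v (by simp)
            have := ih (fun w hw => hws w (by simp [hw]))
            simp only [List.sum_cons, List.length_cons, List.countP_cons]
            rcases hv with rfl | rfl <;> simp <;> omega
      rw [this vs hall, hcnt]; push_cast; ring
  · rintro ⟨hall, hsum⟩
    induction vs with
    | nil => simp at hsum
    | cons v rest ih =>
        have h1 := hall v (by simp)
        have hrest1 : ∀ w ∈ rest, 1 ≤ w := fun w hw => hall w (by simp [hw])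
        have h2 := pvSum_ge_len rest hrest1
        simp only [List.sum_cons, List.length_cons] at hsum
        have hv2 : v ≤ 2 := by push_cast at hsum; omega
        by_cases hveq : v = 2
        · have hrs : rest.sum = rest.length := by push_cast at hsum ⊢; omega
          have hones := pvAll_one rest hrest1 hrs
          have hcnt : rest.countP (fun v => v == 2) = 0 := by
            rw [List.countP_eq_zero]
            intro w hw
            have := hones w hw
            simp [this]
          constructor
          · intro w hw
            rcases List.mem_cons.mp hw with rfl | hw'
            · right; exact hveq
            · left; exact hones w hw'
          · simp [hveq, hcnt]
        · have hv1 : v = 1 := by omega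
          have hrsum : rest.sum = (rest.length : Int) + 1 := by push_cast at hsum ⊢; omega
          obtain ⟨ha, hc⟩ := ih hrest1 hrsum
          constructor
          · intro w hw
            rcases List.mem_cons.mp hw with rfl | hw'
            · left; exact hv1
            · exact ha w hw'
          · simp [hv1, hc]

-- A = true iff Sec ∧ each yaochuhai count ≥ 1 ∧ the yaochuhai counts sum to 14
theorem pvA_iff (counts : List Int) :
    check_thirteen_orphans_py counts = true ↔
      (pvSec counts ∧ (∀ i ∈ pvYaochu, 1 ≤ PySem.List.pyGetD counts i 0)
        ∧ (pvYaochu.map (fun i => PySem.List.pyGetD counts i 0)).sum = 14) := by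
  rw [check_thirteen_orphans_py, pvLoop1_iff]
  have hcnt : pvYaochu.countP (fun i => PySem.List.pyGetD counts i 0 == 2)
      = (pvYaochu.map (fun i => PySem.List.pyGetD counts i 0)).countP (fun v => v == 2) := by
    rw [List.countP_map]; rfl
  constructor
  · rintro ⟨hs, hall, hc⟩
    have := (pvKey (pvYaochu.map (fun i => PySem.List.pyGetD counts i 0))).mp
      ⟨by simpa using hall, by rw [← hcnt]; simpa using hc⟩
    refine ⟨hs, by simpa using this.1, ?_⟩
    have h2 := this.2
    simp only [List.length_map] at h2
    simpa [pvYaochu] using h2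
  · rintro ⟨hs, hall, hsum⟩
    have := (pvKey (pvYaochu.map (fun i => PySem.List.pyGetD counts i 0))).mpr
      ⟨by simpa using hall, by simp only [List.length_map]; simpa [pvYaochu] using hsum⟩
    exact ⟨hs, by simpa using this.1, by rw [hcnt]; simpa using this.2⟩

-- B = true iff the 34-index total is 14 and the per-index conditions hold
theorem pvB_iff (counts : List Int) (hlen : ¬ counts.length < 34) :
    check_thirteen_orphans_py_alt counts = true ↔
      (((PySem.List.pyRange 0 34 1).map (fun i => PySem.List.pyGetD counts i 0)).sum = 14
        ∧ ∀ i ∈ PySem.List.pyRange 0 34 1,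
            (i ∈ pvYaochu → 1 ≤ PySem.List.pyGetD counts i 0)
            ∧ (i ∉ pvYaochu → PySem.List.pyGetD counts i 0 = 0)) := by
  simp only [check_thirteen_orphans_py_alt, if_neg hlen]
  by_cases h : ((PySem.List.pyRange 0 34 1).map (fun i => PySem.List.pyGetD counts i 0)).sum = 14
  · simp only [h, ne_eq, not_true_eq_false, if_false, List.all_eq_true, true_and]
    refine forall₂_congr fun i hi => ?_
    by_cases hy : i ∈ pvYaochu <;> simp [hy]
  · simp [h]

theorem pvA_short (counts : List Int) (h : counts.length < 34) :
    check_thirteen_orphans_py counts = false := by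
  by_contra hne
  have ht : check_thirteen_orphans_py counts = true := by
    revert hne; cases check_thirteen_orphans_py counts <;> simp
  have h33 := ((pvA_iff counts).mp ht).2.1 33 (by simp [pvYaochu])
  have hz : PySem.List.pyGetD counts (33 : Int) 0 = 0 := by
    rw [show (33 : Int) = ((33 : Nat) : Int) by norm_num, PySem.List.pyGetD_natCast]
    exact List.getD_eq_default _ _ (by omega)
  omega

-- ===== VERDICT (by name: the statement is the Claim_ definition above) =====
theorem check_thirteen_orphans_py_spec : Claim_equal_check_thirteen_orphans_py := by
  intro counts _ _
  unfold Spec_check_thirteen_orphans_py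
  by_cases hlen : counts.length < 34
  · rw [pvA_short counts hlen]
    simp [check_thirteen_orphans_py_alt, hlen]
  · rw [Bool.eq_iff_iff, pvA_iff, pvB_iff counts hlen]
    have hR : PySem.List.pyRange 0 34 1 = [0,1,2,3,4,5,6,7,8,9,10,11,12,13,14,15,16,17,18,19,20,21,22,23,24,25,26,27,28,29,30,31,32,33] := by decide
    simp only [pvSec, hR, pvYaochu, List.all_cons, List.all_nil, List.map_cons, List.sum_cons,
      List.map_nil, List.sum_nil, List.mem_cons, List.not_mem_nil]
    simp
    omega
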